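-- pv_equiv track=rewrite | github.com/cajzc/COMP-3981---Project | board.py | tostring_board
-- ===== SOURCE A (Python) =====
-- def tostring_board(player, board):
--     """
--     Converts the board state back to the input file format.
--
--     :param player: Current player ('b' or 'w').
--     :param board: Board dictionary {(x, y): 'b'/'w'/'N'}.
--     :return: String formatted as the input file (player + marbles).
--     """
--     marble_list = []
--     for (x, y), color in board.items():
--         if color == 'N':
--             continue  # Skip empty cells
--         row = chr(y + 69)  # Convert y to row letter (A-I)
--         column = x + 5  # Convert x to column number (1-9)
--         marble_str = f"{row}{column}{color}"
--
--         marble_list.append((color,row,column,marble_str)) # append tuple for sorting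
--
--     sorted_marbles = sorted(marble_list, key=lambda item: (item[0],item[1],item[2]))
--
--     marble_strs = [item[3] for item in sorted_marbles]
--
--     return f"{player}\n{','.join(marble_strs)}"
-- ===== SOURCE B (Python) =====
-- def tostring_board(player, board):
--     """
--     Converts the board state back to the input file format.
--
--     Bucket the non-empty cells by color first, then emit each color group in
--     sorted color order, sorting inside a group by the numeric (y, x) key.
--     """
--     buckets = {}
--     for (x, y), color in board.items():
--         if color != 'N':
--             buckets.setdefault(color, []).append((y, x))
--     parts = []
--     for color in sorted(buckets):
--         for y, x in sorted(buckets[color]):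
--             parts.append(f"{chr(y + 69)}{x + 5}{color}")
--     return f"{player}\n{','.join(parts)}"
-- ===== Notes on version B (the rewrite author's own statement) =====
-- stated objective: alternative
-- what changed: B replaces A's decorate-with-tuples + one composite-key sort over all cells by bucketing the non-empty cells into a dict keyed by color, then emitting the color groups in sorted key order with each group sorted by the numeric (y, x) pair.
import Mathlib
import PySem

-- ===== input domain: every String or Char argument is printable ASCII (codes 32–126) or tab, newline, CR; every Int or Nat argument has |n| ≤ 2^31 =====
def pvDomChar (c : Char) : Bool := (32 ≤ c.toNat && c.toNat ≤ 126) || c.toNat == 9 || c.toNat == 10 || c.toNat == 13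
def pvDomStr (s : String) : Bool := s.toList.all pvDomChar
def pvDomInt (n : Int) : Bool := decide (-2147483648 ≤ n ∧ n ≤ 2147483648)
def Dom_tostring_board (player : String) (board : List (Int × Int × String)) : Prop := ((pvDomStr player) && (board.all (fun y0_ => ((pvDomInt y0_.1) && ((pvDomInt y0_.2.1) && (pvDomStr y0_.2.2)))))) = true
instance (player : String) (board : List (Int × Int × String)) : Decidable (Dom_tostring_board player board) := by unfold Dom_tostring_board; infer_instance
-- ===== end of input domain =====

-- B buckets the non-empty cells by color in a dict and emits the groups in sorted
-- color order (each group sorted by the numeric (y, x) pair) instead of A's single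
-- composite-key sort over decorated tuples; equivalence of the returned string is
-- proved on boards with distinct (x, y) keys and rows in chr's valid non-surrogate range.


-- ===== PORT A =====
-- board : dict {(x, y): color} as an association list of (x, y, color) triples.
def tostring_board (player : String) (board : List (Int × Int × String)) : String :=
  -- for (x, y), color in board.items(): if color == 'N': continue; … append tuple
  let marble_list : List (String × Char × Int × String) :=
    board.foldl (fun acc e =>
      if e.2.2 = "N" then acc
      else
        -- chr(y + 69): exact on Pre_'s valid non-surrogate code-point range
        let row : Char := Char.ofNat (e.2.1 + 69).toNat
        let column : Int := e.1 + 5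
        let marble_str : String := String.ofList [row] ++ PySem.Int.toStr column ++ e.2.2
        acc ++ [(e.2.2, row, column, marble_str)]) []
  -- sorted(marble_list, key=lambda item: (item[0], item[1], item[2])); a one-char
  -- Python string compares exactly like its Char code point
  let sorted_marbles := PySem.List.sorted marble_list
    (fun it => toLex (it.1, toLex (it.2.1, it.2.2.1)))
  let marble_strs := sorted_marbles.map (fun it => it.2.2.2)
  player ++ "\n" ++ PySem.Str.join "," marble_strs

-- ===== PORT B =====
def tostring_board_alt (player : String) (board : List (Int × Int × String)) : String :=
  -- buckets.setdefault(color, []).append((y, x)) for the non-empty cells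
  let buckets : PySem.Dict String (List (Int × Int)) :=
    board.foldl (fun d e =>
      if e.2.2 ≠ "N" then d.modify e.2.2 [] (fun l => l ++ [(e.2.1, e.1)]) else d)
      PySem.Dict.empty
  -- for color in sorted(buckets): for (y, x) in sorted(buckets[color]): …
  -- buckets[color] with color drawn from buckets' own keys always hits: getD is exact
  let parts : List String :=
    (PySem.List.sorted buckets.keys (fun c => c)).flatMap (fun color =>
      (PySem.List.sorted (buckets.getD color []) (fun p => toLex p)).map (fun p =>
        String.ofList [Char.ofNat (p.1 + 69).toNat] ++ PySem.Int.toStr (p.2 + 5) ++ color))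
  player ++ "\n" ++ PySem.Str.join "," parts

-- ===== PRECONDITION & SPEC =====
-- Pre_ excludes (a) lists with duplicate (x, y) keys, which represent no Python dict
-- (board is a dict keyed by (x, y), so no real input has them), and (b) colored cells
-- whose y + 69 is outside chr's range 0..1114111 — there Python's chr raises
-- ValueError — or inside the surrogate range 55296..57343, where A returns a
-- lone-surrogate string that no Lean String can represent (see cites).
def Pre_tostring_board (player : String) (board : List (Int × Int × String)) : Prop :=
  (board.map (fun e => (e.1, e.2.1))).Nodup ∧
  ∀ e ∈ board, e.2.2 ≠ "N" →
    (0 ≤ e.2.1 + 69 ∧ e.2.1 + 69 ≤ 1114111 ∧ ¬(55296 ≤ e.2.1 + 69 ∧ e.2.1 + 69 ≤ 57343))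
instance (player : String) (board : List (Int × Int × String)) : Decidable (Pre_tostring_board player board) := by unfold Pre_tostring_board; infer_instance

def pvWitness_tostring_board : String × (List (Int × Int × String)) :=
  ("b", [(0, 0, "w"), (-4, -4, "b"), (1, 0, "N")])

def Spec_tostring_board (player : String) (board : List (Int × Int × String)) (out : String) : Prop := out = tostring_board_alt player board
instance (player : String) (board : List (Int × Int × String)) (out : String) : Decidable (Spec_tostring_board player board out) := by unfold Spec_tostring_board; infer_instance

-- ===== CLAIM (what is proved, stated in full; the proofs are below) =====
def Claim_equal_tostring_board : Prop := ∀ (player : String) (board : List (Int × Int × String)), Dom_tostring_board player board → Pre_tostring_board player board → Spec_tostring_board player board (tostring_board player board)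

-- ===== LEMMAS AND PROOFS =====

-- the filtered (non-empty) cells
def pvF (board : List (Int × Int × String)) : List (Int × Int × String) :=
  board.filter (fun e => decide (e.2.2 ≠ "N"))

-- A's decoration of one cell
def pvDec (e : Int × Int × String) : String × Char × Int × String :=
  (e.2.2, Char.ofNat (e.2.1 + 69).toNat, e.1 + 5,
   String.ofList [Char.ofNat (e.2.1 + 69).toNat] ++ PySem.Int.toStr (e.1 + 5) ++ e.2.2)

-- the same decoration from B's (y, x) pair and its bucket's color
def pvDec' (col : String) (p : Int × Int) : String × Char × Int × String :=
  (col, Char.ofNat (p.1 + 69).toNat, p.2 + 5,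
   String.ofList [Char.ofNat (p.1 + 69).toNat] ++ PySem.Int.toStr (p.2 + 5) ++ col)

-- A's composite sort key
def pvKey (it : String × Char × Int × String) : Lex (String × Lex (Char × Int)) :=
  toLex (it.1, toLex (it.2.1, it.2.2.1))

-- B's bucket-building step
def pvBStep (d : PySem.Dict String (List (Int × Int))) (e : Int × Int × String) :
    PySem.Dict String (List (Int × Int)) :=
  d.modify e.2.2 [] (fun l => l ++ [(e.2.1, e.1)])

-- B's (y, x) pairs of one color
def pvPairs (board : List (Int × Int × String)) (col : String) : List (Int × Int) :=
  ((pvF board).filter (fun e => decide (e.2.2 = col))).map (fun e => (e.2.1, e.1))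

-- the admissible y-range of Pre_
def pvYOk (y : Int) : Prop :=
  0 ≤ y + 69 ∧ y + 69 ≤ 1114111 ∧ ¬(55296 ≤ y + 69 ∧ y + 69 ≤ 57343)

theorem pv_char_toNat {y : Int} (h : pvYOk y) :
    (Char.ofNat (y + 69).toNat).toNat = (y + 69).toNat := by
  obtain ⟨h1, h2, h3⟩ := h
  have ht : ((y + 69).toNat : Int) = y + 69 := Int.toNat_of_nonneg h1
  have hv : ((y + 69).toNat).isValidChar := by
    unfold Nat.isValidChar
    omega
  simp [Char.ofNat, hv, Char.ofNatAux, Char.toNat]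

theorem pv_char_lt {y y' : Int} (h : pvYOk y) (h' : pvYOk y') (hlt : y < y') :
    Char.ofNat (y + 69).toNat < Char.ofNat (y' + 69).toNat := by
  have e1 := pv_char_toNat h
  have e2 := pv_char_toNat h'
  rw [Char.lt_def, UInt32.lt_iff_toNat_lt]
  have ha : (Char.ofNat (y + 69).toNat).val.toNat = (y + 69).toNat := e1
  have hb : (Char.ofNat (y' + 69).toNat).val.toNat = (y' + 69).toNat := e2
  rw [ha, hb]
  have := Int.toNat_of_nonneg h.1
  have := Int.toNat_of_nonneg h'.1
  omega

theorem pv_mlist_eq (board : List (Int × Int × String)) :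
    board.foldl (fun acc e =>
      if e.2.2 = "N" then acc
      else acc ++ [pvDec e]) [] = (pvF board).map pvDec := by
  have hstep : (fun (acc : List (String × Char × Int × String)) e =>
      if e.2.2 = "N" then acc else acc ++ [pvDec e]) =
      (fun acc e => if e.2.2 ≠ "N" then acc ++ [pvDec e] else acc) := by
    funext acc e
    by_cases hc : e.2.2 = "N" <;> simp [hc]
  rw [hstep, PySem.List.foldl_append_ite (fun e => e.2.2 ≠ "N") pvDec board []]
  simp [pvF]

theorem pv_bucket_getD (l : List (Int × Int × String))
    (d : PySem.Dict String (List (Int × Int))) (col : String) :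
    (l.foldl pvBStep d).getD col [] =
      d.getD col [] ++ ((l.filter (fun e => decide (e.2.2 = col))).map (fun e => (e.2.1, e.1))) := by
  induction l generalizing d with
  | nil => simp
  | cons e t ih =>
    rw [List.foldl_cons, ih, List.filter_cons]
    by_cases hc : e.2.2 = col
    · simp [pvBStep, hc]
    · simp [pvBStep, PySem.Dict.getD_modify, hc, Ne.symm hc]

theorem pv_keys_insert_add (d : PySem.Dict String (List (Int × Int))) (k : String)
    (v : List (Int × Int)) : (d.insert k v).keys = PySem.Set.add d.keys k := by
  by_cases hc : d.contains k = true
  · rw [PySem.Dict.keys_insert_of_contains d v hc]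
    have hm : k ∈ d.keys := (PySem.Dict.contains_iff_mem_keys d k).mp hc
    simp [PySem.Set.add, PySem.Set.contains, hm]
  · have hc' : d.contains k = false := by simpa using hc
    rw [PySem.Dict.keys_insert_of_not_contains d v hc']
    have hm : k ∉ d.keys := fun hm => hc ((PySem.Dict.contains_iff_mem_keys d k).mpr hm)
    simp [PySem.Set.add, PySem.Set.contains, hm]

theorem pv_bucket_keys (l : List (Int × Int × String))
    (d : PySem.Dict String (List (Int × Int))) :
    (l.foldl pvBStep d).keys = PySem.Set.update d.keys (l.map (fun e => e.2.2)) := by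
  induction l generalizing d with
  | nil => simp [PySem.Set.update]
  | cons e t ih =>
    rw [List.foldl_cons, ih, List.map_cons]
    have h1 : (pvBStep d e).keys = PySem.Set.add d.keys e.2.2 := by
      rw [pvBStep, PySem.Dict.keys_modify, pv_keys_insert_add]
    rw [h1]
    simp [PySem.Set.update]

theorem pv_flatMap_filter_perm {α γ : Type} [DecidableEq γ] (c : α → γ) :
    ∀ (cs : List γ) (l : List α), cs.Nodup → (∀ x ∈ l, c x ∈ cs) →
    (cs.flatMap (fun col => l.filter (fun x => decide (c x = col)))).Perm l := by
  intro cs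
  induction cs with
  | nil =>
    intro l _ hcov
    cases l with
    | nil => simp
    | cons a t => exact absurd (hcov a (by simp)) (by simp)
  | cons c0 cs ih =>
    intro l hnd hcov
    obtain ⟨hn0, hnd'⟩ := List.nodup_cons.mp hnd
    rw [List.flatMap_cons]
    have key : ∀ col ∈ cs, l.filter (fun x => decide (c x = col)) =
        (l.filter (fun x => !decide (c x = c0))).filter (fun x => decide (c x = col)) := by
      intro col hcol
      rw [List.filter_filter]
      apply List.filter_congr
      intro a _
      by_cases hac : c a = col
      · have hcol0 : ¬ col = c0 := fun hh => hn0 (hh ▸ hcol)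
        simp [hac, hcol0]
      · simp [hac]
    rw [List.flatMap_congr key]
    have hcov' : ∀ x ∈ l.filter (fun x => !decide (c x = c0)), c x ∈ cs := by
      intro x hx
      obtain ⟨hxl, hxc⟩ := List.mem_filter.mp hx
      have : c x ≠ c0 := by simpa using hxc
      have := hcov x hxl
      simp only [List.mem_cons] at this
      tauto
    have hp := ih (l.filter (fun x => !decide (c x = c0))) hnd' hcov'
    exact (List.Perm.append_left _ hp).trans (List.filter_append_perm _ l)

theorem pv_main (board : List (Int × Int × String))
    (hnd : (board.map (fun e => (e.1, e.2.1))).Nodup)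
    (hy : ∀ e ∈ board, e.2.2 ≠ "N" → pvYOk e.2.1) :
    PySem.List.sorted ((pvF board).map pvDec) pvKey =
      (PySem.List.sorted (PySem.Set.ofList ((pvF board).map (fun e => e.2.2))) (fun c => c)).flatMap
        (fun col => (PySem.List.sorted (pvPairs board col) (fun p => toLex p)).map (pvDec' col)) := by
  have hyF : ∀ e ∈ pvF board, pvYOk e.2.1 := by
    intro e he
    obtain ⟨heb, hec⟩ := List.mem_filter.mp he
    exact hy e heb (by simpa using hec)
  have hcolors_perm : (PySem.List.sorted (PySem.Set.ofList ((pvF board).map (fun e => e.2.2)))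
      (fun c => c)).Perm (PySem.Set.ofList ((pvF board).map (fun e => e.2.2))) :=
    PySem.List.sorted_perm _ _ _
  have hcnd : (PySem.List.sorted (PySem.Set.ofList ((pvF board).map (fun e => e.2.2)))
      (fun c => c)).Nodup :=
    hcolors_perm.symm.nodup (PySem.Set.nodup_ofList _)
  have hcov : ∀ x ∈ pvF board, x.2.2 ∈ PySem.List.sorted
      (PySem.Set.ofList ((pvF board).map (fun e => e.2.2))) (fun c => c) := by
    intro x hx
    rw [PySem.List.mem_sorted, PySem.Set.mem_ofList]
    exact List.mem_map_of_mem hx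
  -- Nodup of the (y, x) pairs of one color
  have hpairs_nd : ∀ col, (pvPairs board col).Nodup := by
    intro col
    have hsub : ((pvF board).filter (fun e => decide (e.2.2 = col))).Sublist board :=
      (List.filter_sublist).trans (List.filter_sublist)
    have h1 : (((pvF board).filter (fun e => decide (e.2.2 = col))).map
        (fun e => (e.1, e.2.1))).Nodup :=
      (hsub.map _).nodup hnd
    have h2 := h1.map (f := Prod.swap) Prod.swap_injective
    rw [List.map_map] at h2
    have : (Prod.swap ∘ fun (e : Int × Int × String) => (e.1, e.2.1)) =
        (fun e => (e.2.1, e.1)) := by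
      funext e; rfl
    rw [this] at h2
    exact h2
  have hmem_pairs : ∀ col, ∀ p ∈ pvPairs board col, pvYOk p.1 := by
    intro col p hp
    obtain ⟨e, he, hep⟩ := List.mem_map.mp hp
    have := hyF e (List.mem_filter.mp he).1
    rw [← hep]
    exact this
  apply PySem.List.sorted_eq_of_perm_of_pairwise_lt
  · -- permutation
    have step1 : ((PySem.List.sorted (PySem.Set.ofList ((pvF board).map (fun e => e.2.2)))
        (fun c => c)).flatMap (fun col => (PySem.List.sorted (pvPairs board col)
          (fun p => toLex p)).map (pvDec' col))).Perm
        ((PySem.List.sorted (PySem.Set.ofList ((pvF board).map (fun e => e.2.2)))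
        (fun c => c)).flatMap (fun col => (pvPairs board col).map (pvDec' col))) := by
      apply List.Perm.flatMap (List.Perm.refl _)
      intro col _
      exact (PySem.List.sorted_perm _ _ _).map _
    have step2 : ((PySem.List.sorted (PySem.Set.ofList ((pvF board).map (fun e => e.2.2)))
        (fun c => c)).flatMap (fun col => (pvPairs board col).map (pvDec' col))) =
        ((PySem.List.sorted (PySem.Set.ofList ((pvF board).map (fun e => e.2.2)))
        (fun c => c)).flatMap (fun col => ((pvF board).filter
          (fun e => decide (e.2.2 = col))).map pvDec)) := by
      apply List.flatMap_congr
      intro col _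
      rw [pvPairs, List.map_map]
      apply List.map_congr_left
      intro e he
      have hec : e.2.2 = col := by simpa using (List.mem_filter.mp he).2
      simp [Function.comp, pvDec', pvDec, hec]
    have step3 : ((PySem.List.sorted (PySem.Set.ofList ((pvF board).map (fun e => e.2.2)))
        (fun c => c)).flatMap (fun col => ((pvF board).filter
          (fun e => decide (e.2.2 = col))).map pvDec)).Perm ((pvF board).map pvDec) := by
      rw [← List.map_flatMap]
      exact (pv_flatMap_filter_perm (fun e => e.2.2) _ (pvF board) hcnd hcov).map pvDec
    exact step1.trans (step2 ▸ step3)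
  · -- strictly increasing in pvKey
    rw [List.pairwise_flatMap]
    constructor
    · intro col hcol
      rw [List.pairwise_map]
      have hple := PySem.List.sorted_pairwise (pvPairs board col) (fun p => toLex p)
      have hsnd : (PySem.List.sorted (pvPairs board col) (fun p => toLex p)).Nodup :=
        (PySem.List.sorted_perm _ _ _).symm.nodup (hpairs_nd col)
      have hne := List.nodup_iff_pairwise_ne.mp hsnd
      refine (hple.and hne).imp_of_mem ?_
      intro a b ha hb hab
      obtain ⟨hle, hneq⟩ := hab
      have hlt : toLex a < toLex b := by
        refine lt_of_le_of_ne hle (fun hEq => hneq ?_)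
        simpa using congrArg ofLex hEq
      have hya : pvYOk a.1 := hmem_pairs col a ((PySem.List.mem_sorted _ _ _ _).mp ha)
      have hyb : pvYOk b.1 := hmem_pairs col b ((PySem.List.mem_sorted _ _ _ _).mp hb)
      rw [Prod.Lex.lt_iff] at hlt
      simp only [ofLex_toLex] at hlt
      show toLex (col, toLex (Char.ofNat (a.1 + 69).toNat, a.2 + 5)) <
        toLex (col, toLex (Char.ofNat (b.1 + 69).toNat, b.2 + 5))
      rw [Prod.Lex.lt_iff]
      simp only [ofLex_toLex]
      refine Or.inr ⟨by simp, ?_⟩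
      rw [Prod.Lex.lt_iff]
      simp only [ofLex_toLex]
      rcases hlt with h1 | ⟨h1, h2⟩
      · exact Or.inl (pv_char_lt hya hyb h1)
      · exact Or.inr ⟨by rw [h1], by omega⟩
    · have hc := PySem.List.sorted_ofList_pairwise_lt ((pvF board).map (fun e => e.2.2))
      refine hc.imp ?_
      intro c₁ c₂ h12 x hx y hy'
      obtain ⟨p, _, hpx⟩ := List.mem_map.mp hx
      obtain ⟨q, _, hqy⟩ := List.mem_map.mp hy'
      rw [← hpx, ← hqy]
      show toLex (c₁, toLex (Char.ofNat (p.1 + 69).toNat, p.2 + 5)) <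
        toLex (c₂, toLex (Char.ofNat (q.1 + 69).toNat, q.2 + 5))
      rw [Prod.Lex.lt_iff]
      simp only [ofLex_toLex]
      exact Or.inl h12

-- ===== VERDICT (by name: the statement is the Claim_ definition above) =====
theorem tostring_board_spec : Claim_equal_tostring_board := by
  intro player board hdom hpre
  obtain ⟨hnd, hy⟩ := hpre
  unfold Spec_tostring_board tostring_board tostring_board_alt
  -- A's marble list
  have hml := pv_mlist_eq board
  simp only [pvDec] at hml
  rw [hml]
  -- B's buckets
  have hbstep : (fun (d : PySem.Dict String (List (Int × Int))) (e : Int × Int × String) =>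
      if e.2.2 ≠ "N" then d.modify e.2.2 [] (fun l => l ++ [(e.2.1, e.1)]) else d) =
      (fun d e => if e.2.2 ≠ "N" then pvBStep d e else d) := by
    funext d e; rw [pvBStep]
  rw [hbstep, PySem.List.foldl_ite_eq_foldl_filter (fun e => e.2.2 ≠ "N") pvBStep board
    PySem.Dict.empty]
  have hkeys : ((pvF board).foldl pvBStep PySem.Dict.empty).keys =
      PySem.Set.ofList ((pvF board).map (fun e => e.2.2)) := by
    rw [pv_bucket_keys, PySem.Dict.keys_empty, PySem.Set.update_nil_left]
  have hgetD : ∀ col, ((pvF board).foldl pvBStep PySem.Dict.empty).getD col [] =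
      pvPairs board col := by
    intro col
    rw [pv_bucket_getD, PySem.Dict.getD_empty, List.nil_append, pvPairs]
  have hmain := pv_main board hnd (fun e he hne => hy e he hne)
  show player ++ "\n" ++ PySem.Str.join "," _ = player ++ "\n" ++ PySem.Str.join "," _
  congr 1
  rw [show (board.filter (fun e => decide (e.2.2 ≠ "N"))) = pvF board from rfl]
  rw [show (fun (it : String × Char × Int × String) => toLex (it.1, toLex (it.2.1, it.2.2.1))) =
    pvKey from rfl]
  rw [hkeys, hmain, List.map_flatMap]
  congr 1
  apply List.flatMap_congr
  intro col _
  rw [hgetD col, List.map_map]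
  rfl
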